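-- pv_equiv track=rewrite | github.com/hx003/haoyuxiong-cs204 | BasicStats.py | createFreqMap
-- ===== SOURCE A (Python) =====
-- def createFreqMap(wlist):
--     '''
--     create a frequency map of a list of words by using dictionary
--     if word already in dictionary, frequency + 1
--     else create another tag if the words is not empty
--     '''
--     '''
--     O will be length of the wlist = n
--     '''
--     b = wlist
--     adict = {}
--     for word in b:
--         if word.lower() in adict:
--             adict[word.lower()] += 1
--         elif word.lower() not in adict and word != '':
--             adict[word.lower()] = 1
--     return adict
-- ===== SOURCE B (Python) =====
-- def createFreqMap(wlist):
--     norm = [w.lower() for w in wlist if w != '']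
--     s = sorted(norm)
--     cnt = {}
--     run = 0
--     for w, nxt in zip(s, s[1:] + ['']):
--         run += 1
--         if nxt != w:
--             cnt[w] = run
--             run = 0
--     return {w: cnt[w] for w in dict.fromkeys(norm)}
-- ===== Notes on version B (the rewrite author's own statement) =====
-- stated objective: alternative
-- what changed: Replaces A's single-pass branch-on-membership hash accumulation with a sort-then-group pipeline: normalize (lowercase, drop empties) once, sort the normalized list, count runs of equal neighbours in one scan, then emit keys in first-occurrence order.
import Mathlib
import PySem

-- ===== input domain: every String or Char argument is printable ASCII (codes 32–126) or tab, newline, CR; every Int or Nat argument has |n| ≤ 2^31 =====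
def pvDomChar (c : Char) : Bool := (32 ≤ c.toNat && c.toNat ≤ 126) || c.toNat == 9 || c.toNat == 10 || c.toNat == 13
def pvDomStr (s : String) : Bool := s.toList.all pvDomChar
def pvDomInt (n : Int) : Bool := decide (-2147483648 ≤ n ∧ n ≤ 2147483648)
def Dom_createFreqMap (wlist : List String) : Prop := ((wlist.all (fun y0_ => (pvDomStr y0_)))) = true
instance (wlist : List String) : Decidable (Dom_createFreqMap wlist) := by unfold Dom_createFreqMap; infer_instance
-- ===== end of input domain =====

-- B normalizes (lowercase, drop empties) once, sorts, counts by scanning runs of equal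
-- neighbours, and emits keys in first-occurrence order: sort-then-group instead of A's
-- branch-on-membership hash accumulation (alternative decomposition, same result).

-- ===== PORT A =====
def createFreqMap (wlist : List String) : List (String × Int) :=
  (wlist.foldl (fun adict word =>
      if adict.contains (PySem.Str.lower word) then
        adict.modify (PySem.Str.lower word) 0 (· + 1)
      else if !adict.contains (PySem.Str.lower word) && word != "" then
        adict.insert (PySem.Str.lower word) 1
      else adict)
    (PySem.Dict.empty : PySem.Dict String Int)).items

-- ===== PORT B =====
-- `zip(s, s[1:] + [''])` pairs each sorted word with its successor ('' as the final
-- sentinel, which never occurs in `norm`); a run ends when the successor differs.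
def createFreqMap_alt (wlist : List String) : List (String × Int) :=
  let norm := (wlist.filter (fun w => w != "")).map PySem.Str.lower
  let s := PySem.List.sorted norm (fun x => x) false
  let cntrun := (s.zip (PySem.List.slice s (some 1) none ++ [""])).foldl
      (fun st p =>
        let run := st.2 + 1
        if p.2 != p.1 then (st.1.insert p.1 run, 0) else (st.1, run))
      ((PySem.Dict.empty : PySem.Dict String Int), (0 : Int))
  (PySem.List.dedup norm).map (fun w => (w, cntrun.1.getD w 0))

-- ===== PRECONDITION & SPEC =====
def Spec_createFreqMap (wlist : List String) (out : List (String × Int)) : Prop := out = createFreqMap_alt wlist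
instance (wlist : List String) (out : List (String × Int)) : Decidable (Spec_createFreqMap wlist out) := by unfold Spec_createFreqMap; infer_instance

-- ===== CLAIM (what is proved, stated in full; the proofs are below) =====
def Claim_equal_createFreqMap : Prop := ∀ (wlist : List String), Dom_createFreqMap wlist → Spec_createFreqMap wlist (createFreqMap wlist)

-- ===== LEMMAS AND PROOFS =====

theorem lower_eq_empty_iff (w : String) : PySem.Str.lower w = "" ↔ w = "" := by
  constructor
  · intro h
    have h2 := congrArg String.toList h
    simp only [PySem.Str.toList_lower, PySem.Chars.lower] at h2
    have hw : w.toList = [] := by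
      cases hw : w.toList <;> simp [hw] at h2 ⊢
    exact String.toList_inj.mp (by simp [hw])
  · intro h; subst h; rfl

theorem modify_of_not_contains (d : PySem.Dict String Int) (k : String) (h : d.contains k = false) :
    d.modify k 0 (· + 1) = d.insert k 1 := by
  simp only [PySem.Dict.modify, PySem.Dict.getD_of_not_contains _ _ h, zero_add]

-- A's loop is exactly the Counter loop over the normalized word list.
theorem fold_eq_counter (wlist : List String) (d : PySem.Dict String Int)
    (hd : d.contains "" = false) :
    wlist.foldl (fun adict word =>
      if adict.contains (PySem.Str.lower word) then
        adict.modify (PySem.Str.lower word) 0 (· + 1)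
      else if !adict.contains (PySem.Str.lower word) && word != "" then
        adict.insert (PySem.Str.lower word) 1
      else adict) d
    = ((wlist.filter (fun w => w != "")).map PySem.Str.lower).foldl
        (fun d x => d.modify x 0 (· + 1)) d := by
  induction wlist generalizing d with
  | nil => rfl
  | cons word rest ih =>
    by_cases hw : word = ""
    · subst hw
      simp only [List.foldl_cons, List.filter_cons, bne_self_eq_false, Bool.false_eq_true,
        if_false]
      rw [if_neg (by rw [show PySem.Str.lower "" = "" from rfl, hd]; simp),
        if_neg (by simp)]
      exact ih d hd
    · have hlw : PySem.Str.lower word ≠ "" := fun h => hw ((lower_eq_empty_iff word).mp h)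
      have hwb : (word != "") = true := by simp [hw]
      simp only [List.foldl_cons, List.filter_cons, hwb, if_true, List.map_cons]
      have hinv : (d.modify (PySem.Str.lower word) 0 (· + 1)).contains "" = false := by
        rw [PySem.Dict.contains_modify]; simp [hd, Ne.symm hlw]
      by_cases hc : d.contains (PySem.Str.lower word) = true
      · rw [if_pos hc]
        exact ih (d.modify (PySem.Str.lower word) 0 (· + 1)) hinv
      · rw [if_neg hc, if_pos (by simp [Bool.not_eq_true] at hc; simp [hc]),
          ← modify_of_not_contains d _ (by simpa using hc)]
        exact ih (d.modify (PySem.Str.lower word) 0 (· + 1)) hinv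

-- structural model of B's run-scanning loop (proof-side only)
def cfmRuns : List String → PySem.Dict String Int → Int → PySem.Dict String Int
  | [], cnt, _ => cnt
  | [w], cnt, run => cnt.insert w (run + 1)
  | w :: w' :: t, cnt, run =>
    if w' ≠ w then cfmRuns (w' :: t) (cnt.insert w (run + 1)) 0
    else cfmRuns (w' :: t) cnt (run + 1)

theorem fold_eq_runs (s : List String) (h : ∀ w ∈ s, w ≠ "") (cnt : PySem.Dict String Int)
    (run : Int) :
    ((s.zip (s.tail ++ [""])).foldl
      (fun st p =>
        let run := st.2 + 1
        if p.2 != p.1 then (st.1.insert p.1 run, 0) else (st.1, run))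
      (cnt, run)).1 = cfmRuns s cnt run := by
  induction s generalizing cnt run with
  | nil => rfl
  | cons w rest ih =>
    cases rest with
    | nil =>
      have hw : w ≠ "" := h w (by simp)
      simp [cfmRuns, Ne.symm hw]
    | cons w' t =>
      have hrest : ∀ x ∈ w' :: t, x ≠ "" := fun x hx => h x (List.mem_cons_of_mem _ hx)
      simp only [List.tail_cons, cfmRuns]
      by_cases hne : w' ≠ w
      · rw [if_pos hne]
        simpa [hne] using ih hrest (cnt.insert w (run + 1)) 0
      · rw [if_neg hne]
        rw [not_ne_iff] at hne
        simpa [hne] using ih hrest cnt (run + 1)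

theorem runs_getD (s : List String) (hs : s.Pairwise (· ≤ ·)) (cnt : PySem.Dict String Int)
    (run : Int) (v : String) :
    (cfmRuns s cnt run).getD v 0 =
      if v ∈ s then (s.count v : Int) + (if s.head? = some v then run else 0)
      else cnt.getD v 0 := by
  induction s generalizing cnt run with
  | nil => simp [cfmRuns]
  | cons w rest ih =>
    cases rest with
    | nil =>
      by_cases hv : v = w
      · subst hv
        simp [cfmRuns, PySem.Dict.getD_insert_self]
        ring
      · simp [cfmRuns, PySem.Dict.getD_insert, hv]
    | cons w' t =>
      have hw : w ≤ w' := (List.pairwise_cons.mp hs).1 w' (by simp)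
      have htail : (w' :: t).Pairwise (· ≤ ·) := (List.pairwise_cons.mp hs).2
      by_cases hne : w' ≠ w
      · -- run ends at w
        have hwlt : w < w' := lt_of_le_of_ne hw (Ne.symm hne)
        have hwnot : w ∉ w' :: t := by
          intro hmem
          rcases List.mem_cons.mp hmem with h1 | h2
          · exact hne h1.symm
          · exact absurd ((List.pairwise_cons.mp htail).1 w h2) (not_le.mpr hwlt)
        rw [show cfmRuns (w :: w' :: t) cnt run
              = cfmRuns (w' :: t) (cnt.insert w (run + 1)) 0 by simp [cfmRuns, hne]]
        rw [ih htail _ 0]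
        by_cases hv : v = w
        · subst hv
          simp [hwnot, PySem.Dict.getD_insert_self,
            List.count_eq_zero.mpr hwnot]
          ring
        · by_cases hvm : v ∈ w' :: t
          · have hcnt : (w :: w' :: t).count v = (w' :: t).count v := by
              simp [List.count_cons, Ne.symm hv]
            simp [hvm, hcnt, List.head?, Ne.symm hv]
          · simp [hvm, hv, PySem.Dict.getD_insert]
      · -- w' = w: the run continues
        rw [not_ne_iff] at hne; subst hne
        rw [show cfmRuns (w' :: w' :: t) cnt run
              = cfmRuns (w' :: t) cnt (run + 1) by simp [cfmRuns]]
        rw [ih htail _ (run + 1)]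
        by_cases hv : v = w'
        · subst hv
          simp
          ring
        · simp [hv, Ne.symm hv]

-- ===== VERDICT (by name: the statement is the Claim_ definition above) =====
theorem createFreqMap_spec : Claim_equal_createFreqMap := by
  intro wlist _
  unfold Spec_createFreqMap createFreqMap createFreqMap_alt
  rw [fold_eq_counter wlist PySem.Dict.empty (by simp [pysem])]
  simp only [← PySem.Dict.counter_eq_foldl, PySem.Dict.items_counter, PySem.List.dedup_eq_ofList,
    PySem.List.slice_from_one]
  set norm := (wlist.filter (fun w => w != "")).map PySem.Str.lower with hnorm
  set s := PySem.List.sorted norm (fun x => x) false with hs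
  have hperm : s.Perm norm := PySem.List.sorted_perm norm (fun x => x) false
  have hne : ∀ w ∈ s, w ≠ "" := by
    intro w hw
    have : w ∈ norm := hperm.mem_iff.mp hw
    rcases List.mem_map.mp this with ⟨u, hu, rfl⟩
    exact fun hcon => by
      have := (lower_eq_empty_iff u).mp hcon
      simp [this] at hu
  have hsorted : s.Pairwise (· ≤ ·) := by
    simpa using PySem.List.sorted_pairwise norm (fun x => x)
  apply List.map_congr_left
  intro w hw
  have hwn : w ∈ norm := by simpa [PySem.Set.mem_ofList] using hw
  have hws : w ∈ s := hperm.mem_iff.mpr hwn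
  rw [fold_eq_runs s hne PySem.Dict.empty 0, runs_getD s hsorted PySem.Dict.empty 0 w]
  simp [hws, hperm.count_eq]
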